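-- pv_equiv track=rewrite | github.com/Uporonier/t5-grpo-new | T5GRPOTrainer.py | docid2string_msmarco
-- ===== SOURCE A (Python) =====
-- from typing import Optional, Union, Dict, Any, List
--
-- def docid2string_msmarco(ids: List[int]) -> str:
--     """
--     Script B 的核心逻辑：去除 0，保留第一个 1，截断后续。
--     """
--     seq: List[int] = []
--     for x in ids:
--         if x == 0: # 过滤 BOS/PAD
--             continue
--         if x == 1: # 遇到 EOS
--             seq.append(1)
--             break
--         seq.append(x)
--     return ",".join(map(str, seq))
-- ===== SOURCE B (Python) =====
-- from typing import List
--
-- def docid2string_msmarco(ids: List[int]) -> str: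
--     idx = next((i for i, x in enumerate(ids) if x == 1), None)
--     prefix = ids if idx is None else ids[:idx + 1]
--     seq = [x for x in prefix if x != 0]
--     return ",".join(map(str, seq))
-- ===== Notes on version B (the rewrite author's own statement) =====
-- stated objective: alternative
-- what changed: Replaces the single break-controlled accumulator loop with a two-pass structure: first locate the index of the first EOS token (1), truncate the list to that boundary, then filter zeros in a separate comprehension.
import Mathlib
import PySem

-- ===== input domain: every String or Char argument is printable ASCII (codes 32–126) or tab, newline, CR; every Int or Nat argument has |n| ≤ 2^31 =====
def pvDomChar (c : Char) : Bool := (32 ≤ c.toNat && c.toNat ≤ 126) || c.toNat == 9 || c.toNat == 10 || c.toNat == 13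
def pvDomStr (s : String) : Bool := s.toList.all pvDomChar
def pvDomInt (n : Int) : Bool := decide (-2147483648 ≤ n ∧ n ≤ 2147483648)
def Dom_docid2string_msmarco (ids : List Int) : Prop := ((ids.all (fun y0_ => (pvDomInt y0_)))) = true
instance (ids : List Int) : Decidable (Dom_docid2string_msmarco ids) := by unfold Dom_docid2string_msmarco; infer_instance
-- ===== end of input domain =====

-- B replaces A's break-controlled loop by locate-first-EOS then a separate zero-filter pass (alternative decomposition, same cost).
-- ===== PORT A =====
-- the for-loop with continue/break, as structural recursion over ids building seq
def pvALoop (ids : List Int) : List Int :=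
  match ids with
  | [] => []
  | x :: r =>
    if x = 0 then pvALoop r
    else if x = 1 then [1]
    else x :: pvALoop r

def docid2string_msmarco (ids : List Int) : String :=
  PySem.Str.join "," ((pvALoop ids).map PySem.Int.toStr)

-- ===== PORT B =====
-- next((i for i, x in enumerate(ids) if x == 1), None)
def pvFirstOneIdx (ids : List Int) : Option Nat :=
  match ids with
  | [] => none
  | x :: r => if x = 1 then some 0 else (pvFirstOneIdx r).map (· + 1)

def docid2string_msmarco_alt (ids : List Int) : String :=
  let idx := pvFirstOneIdx ids
  let prefix_ := match idx with
    | none => ids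
    | some i => ids.take (i + 1)
  let seq := prefix_.filter (fun x => x ≠ 0)
  PySem.Str.join "," (seq.map PySem.Int.toStr)

-- ===== PRECONDITION & SPEC =====
def Spec_docid2string_msmarco (ids : List Int) (out : String) : Prop := out = docid2string_msmarco_alt ids
instance (ids : List Int) (out : String) : Decidable (Spec_docid2string_msmarco ids out) := by unfold Spec_docid2string_msmarco; infer_instance

-- ===== CLAIM (what is proved, stated in full; the proofs are below) =====
def Claim_equal_docid2string_msmarco : Prop := ∀ (ids : List Int), Dom_docid2string_msmarco ids → Spec_docid2string_msmarco ids (docid2string_msmarco ids)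

-- ===== LEMMAS AND PROOFS =====

-- ===== VERDICT (by name: the statement is the Claim_ definition above) =====
-- the two notions of sequence coincide
theorem pvSeq_eq (ids : List Int) :
    pvALoop ids =
      (match pvFirstOneIdx ids with
        | none => ids
        | some i => ids.take (i + 1)).filter (fun x => x ≠ 0) := by
  induction ids with
  | nil => simp [pvALoop, pvFirstOneIdx]
  | cons x r ih =>
    by_cases h1 : x = 1
    · subst h1; simp [pvALoop, pvFirstOneIdx]
    · by_cases h0 : x = 0
      · subst h0
        simp only [pvALoop, pvFirstOneIdx, if_neg (by decide : (0:Int) ≠ 1)]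
        rw [ih]
        cases h : pvFirstOneIdx r <;> simp [List.filter]
      · simp only [pvALoop, pvFirstOneIdx, if_neg h0, if_neg h1]
        rw [ih]
        cases h : pvFirstOneIdx r <;> simp [List.filter, h0]

theorem docid2string_msmarco_spec : Claim_equal_docid2string_msmarco := by
  intro ids _
  unfold Spec_docid2string_msmarco docid2string_msmarco docid2string_msmarco_alt
  rw [pvSeq_eq]
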